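-- pv_equiv track=rewrite | github.com/radugaboost/algo_homework | task_4.py | min_diff
-- ===== SOURCE A (Python) =====
-- def min_diff(arr):
--     arr.sort()
--     min_diff = 10**6
--     lst = []
--     for i in range(1, len(arr)): ##определение минимальной разницы
--         if arr[i] - arr[i-1] < min_diff:
--             min_diff = arr[i] - arr[i-1]
--     for i in range(1, len(arr)):  ##находим пары
--         if arr[i] - arr[i-1] == min_diff:
--             lst.append([arr[i-1], arr[i]])
--     return lst
-- ===== SOURCE B (Python) =====
-- def min_diff(arr):
--     arr.sort()
--     best = 10**6
--     lst = []
--     for x, y in zip(arr, arr[1:]):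
--         d = y - x
--         if d < best:
--             best = d
--             lst = [[x, y]]
--         elif d == best:
--             lst.append([x, y])
--     return lst
-- ===== Notes on version B (the rewrite author's own statement) =====
-- stated objective: alternative
-- what changed: Replaces A's two index loops over the sorted array (one to find the minimal adjacent difference, one to collect the pairs) by a single pass over adjacent pairs via zip that resets the collected list whenever a new minimum appears.
import Mathlib
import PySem

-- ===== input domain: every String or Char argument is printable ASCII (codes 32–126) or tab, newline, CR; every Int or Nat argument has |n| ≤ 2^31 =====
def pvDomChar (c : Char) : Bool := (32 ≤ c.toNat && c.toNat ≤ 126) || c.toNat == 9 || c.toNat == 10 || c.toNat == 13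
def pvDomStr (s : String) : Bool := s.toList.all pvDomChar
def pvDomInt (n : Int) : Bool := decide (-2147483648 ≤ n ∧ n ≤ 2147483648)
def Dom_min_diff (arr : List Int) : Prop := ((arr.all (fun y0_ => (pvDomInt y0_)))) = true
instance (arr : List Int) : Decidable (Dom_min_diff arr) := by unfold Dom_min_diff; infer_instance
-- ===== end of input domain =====

-- B merges A's two passes over the sorted array into one zip pass that resets the
-- collected list on each new minimum (same return value; both sort the caller's list
-- in place in Python — the equivalence proved here is about the return value).

-- ===== PORT A =====
def min_diff (arr : List Int) : List (List Int) :=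
  let a := PySem.List.sorted arr (fun x => x) false
  let m := (PySem.List.pyRange 1 (a.length : Int) 1).foldl
    (fun m i =>
      if PySem.List.pyGetD a i 0 - PySem.List.pyGetD a (i - 1) 0 < m then
        PySem.List.pyGetD a i 0 - PySem.List.pyGetD a (i - 1) 0
      else m) (10 ^ 6)
  (PySem.List.pyRange 1 (a.length : Int) 1).foldl
    (fun lst i =>
      if PySem.List.pyGetD a i 0 - PySem.List.pyGetD a (i - 1) 0 = m then
        lst ++ [[PySem.List.pyGetD a (i - 1) 0, PySem.List.pyGetD a i 0]]
      else lst) []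

-- ===== PORT B =====
def min_diff_alt (arr : List Int) : List (List Int) :=
  let a := PySem.List.sorted arr (fun x => x) false
  ((a.zip (PySem.List.slice a (some 1) none)).foldl
    (fun st p =>
      let d := p.2 - p.1
      if d < st.1 then (d, [[p.1, p.2]])
      else if d = st.1 then (st.1, st.2 ++ [[p.1, p.2]])
      else st)
    ((10 ^ 6 : Int), ([] : List (List Int)))).2

-- ===== PRECONDITION & SPEC =====
def Spec_min_diff (arr : List Int) (out : List (List Int)) : Prop := out = min_diff_alt arr
instance (arr : List Int) (out : List (List Int)) : Decidable (Spec_min_diff arr out) := by unfold Spec_min_diff; infer_instance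

-- ===== CLAIM (what is proved, stated in full; the proofs are below) =====
def Claim_equal_min_diff : Prop := ∀ (arr : List Int), Dom_min_diff arr → Spec_min_diff arr (min_diff arr)

-- ===== LEMMAS AND PROOFS =====

-- running minimum of the adjacent differences (the state of A's first loop, on pairs)
def pvMinF (ps : List (Int × Int)) (m0 : Int) : Int :=
  ps.foldl (fun m p => if p.2 - p.1 < m then p.2 - p.1 else m) m0

-- the pairs with difference M, as A's second loop emits them
def pvCollect (ps : List (Int × Int)) (M : Int) : List (List Int) :=
  (ps.filter (fun p => p.2 - p.1 == M)).map (fun p => [p.1, p.2])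

lemma pvMinF_le (ps : List (Int × Int)) : ∀ m0 : Int, pvMinF ps m0 ≤ m0 := by
  induction ps with
  | nil => intro m0; simp [pvMinF]
  | cons p t ih =>
    intro m0
    simp only [pvMinF, List.foldl_cons]
    split_ifs with h
    · exact le_trans (ih (p.2 - p.1)) (le_of_lt h)
    · exact ih m0

lemma pvCollect_cons (p : Prod Int Int) (t : List (Int × Int)) (M : Int) :
    pvCollect (p :: t) M = (if p.2 - p.1 = M then [[p.1, p.2]] else []) ++ pvCollect t M := by
  simp only [pvCollect, List.filter_cons]
  split_ifs with h <;> simp_all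

-- invariant of B's single pass: it computes the running minimum together with
-- exactly the pairs A's second loop would collect for that minimum
lemma pvOnePass_eq (ps : List (Int × Int)) : ∀ (m0 : Int) (l0 : List (List Int)),
    ps.foldl (fun st p =>
        if p.2 - p.1 < st.1 then (p.2 - p.1, [[p.1, p.2]])
        else if p.2 - p.1 = st.1 then (st.1, st.2 ++ [[p.1, p.2]])
        else st) (m0, l0)
      = (pvMinF ps m0, (if pvMinF ps m0 < m0 then [] else l0) ++ pvCollect ps (pvMinF ps m0)) := by
  induction ps with
  | nil => intro m0 l0; simp [pvMinF, pvCollect]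
  | cons p t ih =>
    intro m0 l0
    have hM : pvMinF (p :: t) m0 = pvMinF t (if p.2 - p.1 < m0 then p.2 - p.1 else m0) := by
      simp [pvMinF]
    simp only [List.foldl_cons]
    by_cases h1 : p.2 - p.1 < m0
    · simp only [h1, if_pos]
      rw [ih (p.2 - p.1) [[p.1, p.2]]]
      have hle : pvMinF t (p.2 - p.1) ≤ p.2 - p.1 := pvMinF_le t _
      rw [hM, if_pos h1, pvCollect_cons]
      by_cases h2 : pvMinF t (p.2 - p.1) < p.2 - p.1
      · have hlt : pvMinF t (p.2 - p.1) < m0 := lt_trans h2 h1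
        rw [if_pos h2, if_pos hlt, if_neg (by omega)]
        simp
      · have heq : pvMinF t (p.2 - p.1) = p.2 - p.1 := le_antisymm hle (by omega)
        rw [if_neg h2, if_pos (by omega : pvMinF t (p.2 - p.1) < m0), if_pos heq.symm]
        simp
    · simp only [h1, if_false]
      have hle : pvMinF t m0 ≤ m0 := pvMinF_le t _
      rw [hM, if_neg h1]
      by_cases h2 : p.2 - p.1 = m0
      · simp only [h2, if_true]
        rw [ih m0 (l0 ++ [[p.1, p.2]]), pvCollect_cons]
        by_cases h3 : pvMinF t m0 < m0
        · rw [if_pos h3, if_pos h3, if_neg (by omega)]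
          simp
        · rw [if_neg h3, if_neg h3, if_pos (by omega : p.2 - p.1 = pvMinF t m0)]
          simp
      · simp only [h2, if_false]
        rw [ih m0 l0, pvCollect_cons, if_neg (by omega : ¬ p.2 - p.1 = pvMinF t m0)]
        simp

-- index-loop over range(1, len) reading a[i-1], a[i]  =  fold over zip a (tail a)
lemma pvFoldRange_aux {β : Type} (g : β → Int → Int → β) :
    ∀ (s : List Int) (x : Int) (init : β),
      (List.range s.length).foldl (fun acc k => g acc ((x :: s).getD k 0) (s.getD k 0)) init
        = ((x :: s).zip s).foldl (fun acc p => g acc p.1 p.2) init := by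
  intro s
  induction s with
  | nil => intro x init; simp
  | cons y t ih =>
    intro x init
    rw [List.length_cons, List.range_succ_eq_map, List.foldl_cons, List.foldl_map]
    simp only [List.getD_cons_zero, List.getD_cons_succ, Nat.succ_eq_add_one]
    rw [ih y (g init x y)]
    simp [List.zip]

lemma pvFoldRange {β : Type} (g : β → Int → Int → β) (a : List Int) (init : β) :
    (PySem.List.pyRange 1 (a.length : Int) 1).foldl
        (fun acc i => g acc (PySem.List.pyGetD a (i - 1) 0) (PySem.List.pyGetD a i 0)) init
      = (a.zip a.tail).foldl (fun acc p => g acc p.1 p.2) init := by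
  cases a with
  | nil => simp
  | cons x s =>
    rw [PySem.List.pyRange_one, List.foldl_map]
    have hlen : (((x :: s).length : Int) - 1).toNat = s.length := by
      rw [List.length_cons]
      push_cast
      omega
    rw [hlen]
    have hbody : ∀ (acc : β) (k : Nat),
        g acc (PySem.List.pyGetD (x :: s) ((1 : Int) + (k : Int) - 1) 0)
              (PySem.List.pyGetD (x :: s) ((1 : Int) + (k : Int)) 0)
          = g acc ((x :: s).getD k 0) (s.getD k 0) := by
      intro acc k
      have h1 : (1 : Int) + (k : Int) - 1 = ((k : Nat) : Int) := by ring
      have h2 : (1 : Int) + (k : Int) = (((k + 1 : Nat)) : Int) := by push_cast; ring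
      rw [h1, h2, PySem.List.pyGetD_natCast, PySem.List.pyGetD_natCast]
      simp
    simp only [hbody]
    rw [pvFoldRange_aux g s x init]
    simp only [List.tail_cons]

-- ===== VERDICT (by name: the statement is the Claim_ definition above) =====
theorem min_diff_spec : Claim_equal_min_diff := by
  intro arr _
  show min_diff arr = min_diff_alt arr
  simp only [min_diff, min_diff_alt, PySem.List.slice_from_one]
  generalize PySem.List.sorted arr (fun x => x) false = a
  have hm : List.foldl
      (fun m i =>
        if PySem.List.pyGetD a i 0 - PySem.List.pyGetD a (i - 1) 0 < m then
          PySem.List.pyGetD a i 0 - PySem.List.pyGetD a (i - 1) 0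
        else m) (10 ^ 6) (PySem.List.pyRange 1 (a.length : Int) 1)
      = pvMinF (a.zip a.tail) (10 ^ 6) :=
    pvFoldRange (fun m u v => if v - u < m then v - u else m) a (10 ^ 6)
  rw [hm]
  set M := pvMinF (a.zip a.tail) (10 ^ 6) with hMdef
  have h2 : List.foldl
      (fun lst i =>
        if PySem.List.pyGetD a i 0 - PySem.List.pyGetD a (i - 1) 0 = M then
          lst ++ [[PySem.List.pyGetD a (i - 1) 0, PySem.List.pyGetD a i 0]]
        else lst) [] (PySem.List.pyRange 1 (a.length : Int) 1)
      = (a.zip a.tail).foldl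
          (fun lst p => if p.2 - p.1 = M then lst ++ [[p.1, p.2]] else lst) [] :=
    pvFoldRange (fun lst u v => if v - u = M then lst ++ [[u, v]] else lst) a []
  rw [h2, pvOnePass_eq (a.zip a.tail) (10 ^ 6) []]
  have hb : (fun (l : List (List Int)) (p : Int × Int) =>
        if p.2 - p.1 = M then l ++ [[p.1, p.2]] else l)
      = (fun l p => if (fun (q : Int × Int) => q.2 - q.1 == M) p = true
                    then l ++ [(fun (q : Int × Int) => [q.1, q.2]) p] else l) := by
    funext l p; simp
  rw [hb, PySem.List.foldl_append_if]
  norm_num [pvCollect, hMdef]
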